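-- pv_equiv track=rewrite | github.com/incnone/AdventOfCode | 2021/day10.py | score_close_str
-- ===== SOURCE A (Python) =====
-- def score_close_str(s: str):
--     pts = {
--         ')': 1,
--         ']': 2,
--         '}': 3,
--         '>': 4,
--     }
--     tot = 0
--     for c in s:
--         tot = 5*tot + pts[c]
--     return tot
-- ===== SOURCE B (Python) =====
-- def score_close_str(s: str):
--     pts = {
--         ')': 1,
--         ']': 2,
--         '}': 3,
--         '>': 4,
--     }
--
--     def go(chars):
--         if not chars:
--             return 0
--         return pts[chars[0]] * 5 ** (len(chars) - 1) + go(chars[1:])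
--
--     return go(list(s))
-- ===== Notes on version B (the rewrite author's own statement) =====
-- stated objective: alternative
-- what changed: Replaces A's iterative Horner accumulator with a structural recursion on the character list that adds explicit place-value terms pts[c] * 5**(remaining length) at each step.
import Mathlib
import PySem

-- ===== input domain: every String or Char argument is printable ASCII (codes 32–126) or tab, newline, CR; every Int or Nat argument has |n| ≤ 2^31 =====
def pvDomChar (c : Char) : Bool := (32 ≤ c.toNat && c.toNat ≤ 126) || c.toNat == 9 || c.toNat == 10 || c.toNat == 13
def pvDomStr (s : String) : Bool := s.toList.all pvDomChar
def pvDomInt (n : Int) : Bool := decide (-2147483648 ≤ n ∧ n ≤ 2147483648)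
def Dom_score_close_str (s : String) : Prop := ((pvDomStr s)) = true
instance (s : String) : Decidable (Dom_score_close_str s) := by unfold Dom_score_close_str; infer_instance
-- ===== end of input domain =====

-- B replaces A's iterative Horner accumulator by a structural recursion adding explicit place-value terms (objective: alternative decomposition).

-- ===== PORT A =====
-- the pts dict of A
def ptsA : PySem.Dict Char Int := PySem.Dict.ofList [(')', 1), (']', 2), ('}', 3), ('>', 4)]

-- lookup pts[c]; Python raises KeyError on a miss — Pre_ excludes such inputs, the default is never read there
def score_close_str (s : String) : Int :=
  s.toList.foldl (fun tot c => 5 * tot + (PySem.Dict.getD ptsA c 0)) 0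

-- ===== PORT B =====
-- the pts dict of B
def ptsB : PySem.Dict Char Int := PySem.Dict.ofList [(')', 1), (']', 2), ('}', 3), ('>', 4)]

-- def go(chars): if not chars: return 0; return pts[chars[0]] * 5 ** (len(chars)-1) + go(chars[1:])
def score_close_go : List Char → Int
  | [] => 0
  | c :: rest => (PySem.Dict.getD ptsB c 0) * (5 : Int) ^ rest.length + score_close_go rest

def score_close_str_alt (s : String) : Int := score_close_go s.toList

-- ===== PRECONDITION & SPEC =====
-- Pre_: every character is a closing bracket scored by pts; on any other character both Pythons raise KeyError.
def Pre_score_close_str (s : String) : Prop :=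
  (s.toList.all (fun c => c = ')' || c = ']' || c = '}' || c = '>')) = true
instance (s : String) : Decidable (Pre_score_close_str s) := by unfold Pre_score_close_str; infer_instance

def pvWitness_score_close_str : String := "}}>]))"

def Spec_score_close_str (s : String) (out : Int) : Prop := out = score_close_str_alt s
instance (s : String) (out : Int) : Decidable (Spec_score_close_str s out) := by unfold Spec_score_close_str; infer_instance

-- ===== CLAIM (what is proved, stated in full; the proofs are below) =====
def Claim_equal_score_close_str : Prop := ∀ (s : String), Dom_score_close_str s → Pre_score_close_str s → Spec_score_close_str s (score_close_str s)

-- ===== LEMMAS AND PROOFS =====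

-- the two dicts are the same association list
theorem pts_eq : ptsA = ptsB := rfl

-- Horner fold from any accumulator equals the accumulator shifted by 5^length plus the positional recursion
theorem horner_eq_go (l : List Char) (a : Int) :
    l.foldl (fun tot c => 5 * tot + (PySem.Dict.getD ptsA c 0)) a
      = a * 5 ^ l.length + score_close_go l := by
  induction l generalizing a with
  | nil => simp [score_close_go]
  | cons c t ih =>
    simp only [List.foldl_cons, score_close_go, List.length_cons]
    rw [ih, pts_eq]
    ring

-- ===== VERDICT (by name: the statement is the Claim_ definition above) =====
theorem score_close_str_spec : Claim_equal_score_close_str := by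
  intro s _ _
  unfold Spec_score_close_str score_close_str score_close_str_alt
  rw [horner_eq_go]
  ring
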